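-- pv_equiv track=rewrite | github.com/Mostafa182003/alg1 | odd3.py | naive
-- ===== SOURCE A (Python) =====
-- def naive(a):
--     k = 0
--     topp = []
--     for j in range(10,100):
--         for i in range(len(a)-1):
--             if str(j) == a[i]+a[i+1]:
--                 k += 1
--         else:
--             topp.append(k)
--             k = 0
--     return max(topp), topp.index(max(topp))+10
-- ===== SOURCE B (Python) =====
-- def naive(a):
--     counts = {}
--     for i in range(len(a) - 1):
--         s = a[i] + a[i + 1]
--         counts[s] = counts.get(s, 0) + 1
--     best_c, best_j = 0, 10
--     for j in range(10, 100):
--         c = counts.get(str(j), 0)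
--         if c > best_c:
--             best_c, best_j = c, j
--     return best_c, best_j
-- ===== Notes on version B (the rewrite author's own statement) =====
-- stated objective: faster
-- what changed: Instead of scanning all adjacent pairs once per candidate j in 10..99 and then taking max/index over the 90 counts, B builds a frequency dictionary of the adjacent-pair concatenations in a single pass and then takes one strict-greater argmax walk over j=10..99, which keeps the smallest j on ties exactly like topp.index(max).
import Mathlib
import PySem

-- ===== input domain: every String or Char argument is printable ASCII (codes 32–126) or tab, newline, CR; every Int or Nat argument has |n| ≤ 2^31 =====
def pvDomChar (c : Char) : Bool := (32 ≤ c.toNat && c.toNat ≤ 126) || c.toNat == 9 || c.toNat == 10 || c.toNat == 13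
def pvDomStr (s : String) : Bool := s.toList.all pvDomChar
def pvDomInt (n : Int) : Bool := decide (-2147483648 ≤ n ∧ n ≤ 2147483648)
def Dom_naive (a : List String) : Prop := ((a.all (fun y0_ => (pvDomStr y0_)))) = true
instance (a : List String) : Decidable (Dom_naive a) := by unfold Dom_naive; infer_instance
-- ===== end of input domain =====

-- B replaces A's 90 scans over the adjacent pairs by one counting dictionary plus one argmax walk over j = 10..99 (constant-factor speedup).

-- ===== PORT A =====
def naive (a : List String) : Int × Int :=
  let topp : List Int := (PySem.List.pyRange 10 100 1).foldl (fun topp j =>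
    topp ++ [(PySem.List.pyRange 0 (PySem.List.len a - 1) 1).foldl (fun k i =>
      if PySem.Int.toStr j == PySem.List.pyGetD a i "" ++ PySem.List.pyGetD a (i + 1) ""
      then k + 1 else k) (0 : Int)]) []
  -- topp always has the 90 counts, so Python's max/.index never raise; the .getD defaults are unreachable
  let m : Int := (PySem.List.max? topp (fun x => x)).getD 0
  (m, (((PySem.List.index? topp m).getD 0 : Nat) : Int) + 10)

-- ===== PORT B =====
def naive_alt (a : List String) : Int × Int :=
  let counts : PySem.Dict String Int := (PySem.List.pyRange 0 (PySem.List.len a - 1) 1).foldl (fun d i =>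
    let s := PySem.List.pyGetD a i "" ++ PySem.List.pyGetD a (i + 1) ""
    d.insert s (d.getD s 0 + 1)) PySem.Dict.empty
  (PySem.List.pyRange 10 100 1).foldl (fun best j =>
    let c := counts.getD (PySem.Int.toStr j) 0
    if c > best.1 then (c, j) else best) ((0 : Int), (10 : Int))

-- ===== PRECONDITION & SPEC =====
def Spec_naive (a : List String) (out : Int × Int) : Prop := out = naive_alt a
instance (a : List String) (out : Int × Int) : Decidable (Spec_naive a out) := by unfold Spec_naive; infer_instance

-- ===== CLAIM (what is proved, stated in full; the proofs are below) =====
def Claim_equal_naive : Prop := ∀ (a : List String), Dom_naive a → Spec_naive a (naive a)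

-- ===== LEMMAS AND PROOFS =====

-- the list of adjacent-pair concatenations a[i]+a[i+1]
def pvPairs (a : List String) : List String :=
  (PySem.List.pyRange 0 (PySem.List.len a - 1) 1).map
    (fun i => PySem.List.pyGetD a i "" ++ PySem.List.pyGetD a (i + 1) "")

-- the count A accumulates for a given j
def pvCnt (a : List String) (j : Int) : Int := ((pvPairs a).count (PySem.Int.toStr j) : Int)

lemma pvCnt_nonneg (a : List String) (j : Int) : 0 ≤ pvCnt a j := by
  simp [pvCnt]

-- A's inner loop computes pvCnt
lemma pvInner_eq (a : List String) (j : Int) :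
    (PySem.List.pyRange 0 (PySem.List.len a - 1) 1).foldl (fun k i =>
      if PySem.Int.toStr j == PySem.List.pyGetD a i "" ++ PySem.List.pyGetD a (i + 1) ""
      then k + 1 else k) (0 : Int) = pvCnt a j := by
  have h := List.foldl_map
    (f := fun i => PySem.List.pyGetD a i "" ++ PySem.List.pyGetD a (i + 1) "")
    (g := fun (k : Int) (s : String) => if PySem.Int.toStr j == s then k + 1 else k)
    (l := PySem.List.pyRange 0 (PySem.List.len a - 1) 1) (init := (0 : Int))
  rw [show (fun (k : Int) i =>
      if PySem.Int.toStr j == PySem.List.pyGetD a i "" ++ PySem.List.pyGetD a (i + 1) ""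
      then k + 1 else k) = (fun (k : Int) i => (fun (k : Int) (s : String) =>
      if PySem.Int.toStr j == s then k + 1 else k) k
        ((fun i => PySem.List.pyGetD a i "" ++ PySem.List.pyGetD a (i + 1) "") i)) from rfl, ← h]
  rw [show (fun (k : Int) (s : String) => if PySem.Int.toStr j == s then k + 1 else k)
      = (fun (k : Int) (s : String) => if s == PySem.Int.toStr j then k + 1 else k) from by
    funext k s
    by_cases hb : PySem.Int.toStr j = s
    · simp [hb]
    · simp [hb, Ne.symm hb]]
  rw [PySem.List.foldl_beq_add_one]
  simp [pvCnt, pvPairs]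

-- B's dictionary looks up pvCnt
lemma pvDict_eq (a : List String) (j : Int) :
    ((PySem.List.pyRange 0 (PySem.List.len a - 1) 1).foldl (fun d i =>
      let s := PySem.List.pyGetD a i "" ++ PySem.List.pyGetD a (i + 1) ""
      d.insert s (d.getD s 0 + 1)) PySem.Dict.empty).getD (PySem.Int.toStr j) 0 = pvCnt a j := by
  have h := List.foldl_map
    (f := fun i => PySem.List.pyGetD a i "" ++ PySem.List.pyGetD a (i + 1) "")
    (g := fun (d : PySem.Dict String Int) (s : String) => d.insert s (d.getD s 0 + 1))
    (l := PySem.List.pyRange 0 (PySem.List.len a - 1) 1) (init := (PySem.Dict.empty : PySem.Dict String Int))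
  rw [show (fun (d : PySem.Dict String Int) i =>
      let s := PySem.List.pyGetD a i "" ++ PySem.List.pyGetD a (i + 1) ""
      d.insert s (d.getD s 0 + 1)) = (fun (d : PySem.Dict String Int) i =>
      (fun (d : PySem.Dict String Int) (s : String) => d.insert s (d.getD s 0 + 1)) d
        ((fun i => PySem.List.pyGetD a i "" ++ PySem.List.pyGetD a (i + 1) "") i)) from rfl, ← h]
  rw [PySem.Dict.getD_foldl_insert_add_one]
  simp [pvCnt, pvPairs]

-- the argmax fold over a range agrees with (max, first index of max)
lemma pvBest_spec (f : Int → Int) (hf : ∀ j, 0 ≤ f j) : ∀ n : Nat, 1 ≤ n →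
    (PySem.List.pyRange 10 (10 + (n : Int)) 1).foldl
      (fun (best : Int × Int) j => if f j > best.1 then (f j, j) else best) ((0 : Int), (10 : Int))
    = (((PySem.List.max? ((PySem.List.pyRange 10 (10 + (n : Int)) 1).map f) (fun x => x)).getD 0),
       (((PySem.List.index? ((PySem.List.pyRange 10 (10 + (n : Int)) 1).map f)
          ((PySem.List.max? ((PySem.List.pyRange 10 (10 + (n : Int)) 1).map f) (fun x => x)).getD 0)).getD 0 : Nat) : Int) + 10) := by
  intro n hn
  induction n, hn using Nat.le_induction with
  | base =>
      rw [show (10 : Int) + (1 : Nat) = 10 + 1 by norm_num, PySem.List.pyRange_one_singleton]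
      simp only [List.foldl_cons, List.foldl_nil, List.map_cons, List.map_nil]
      rw [PySem.List.max?_id_cons (f 10) ([] : List Int)]
      simp only [List.foldl_nil, Option.getD_some, PySem.List.index?_cons_self]
      by_cases h : f 10 > 0
      · simp [h]
      · have h0 : f 10 = 0 := le_antisymm (by omega) (hf 10)
        simp [h0]
  | succ n hn ih =>
      have hsplit : PySem.List.pyRange 10 (10 + ((n + 1 : Nat) : Int)) 1
          = PySem.List.pyRange 10 (10 + (n : Int)) 1 ++ [10 + (n : Int)] := by
        rw [show (10 : Int) + ((n + 1 : Nat) : Int) = (10 + (n : Int)) + 1 by push_cast; ring]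
        exact PySem.List.pyRange_one_succ_right (by omega)
      set l := (PySem.List.pyRange 10 (10 + (n : Int)) 1).map f with hl
      have hlen : l.length = n := by
        simp [hl, PySem.List.length_pyRange_one]
      have hne : l ≠ [] := by
        intro h; rw [h] at hlen; simp at hlen; omega
      obtain ⟨x, t, hxt⟩ := List.exists_cons_of_ne_nil hne
      have hmax : PySem.List.max? l (fun x0 => x0) = some (t.foldl max x) := by
        rw [hxt]; exact PySem.List.max?_id_cons x t
      set M := t.foldl max x with hM
      set y := f (10 + (n : Int)) with hy
      have hmax' : PySem.List.max? (l ++ [y]) (fun x0 => x0) = some (max M y) := by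
        rw [hxt]
        show PySem.List.max? (x :: (t ++ [y])) (fun x0 => x0) = _
        rw [PySem.List.max?_id_cons x (t ++ [y])]
        simp [hM]
      rw [hsplit, List.foldl_append, List.map_append, ih]
      simp only [List.map_cons, List.map_nil, List.foldl_cons, List.foldl_nil, hmax,
        Option.getD_some]
      rw [show ((PySem.List.pyRange 10 (10 + (n : Int)) 1).map f ++ [f (10 + (n : Int))])
          = l ++ [y] from rfl]
      rw [hmax']
      simp only [Option.getD_some]
      by_cases hgt : y > M
      · have hynotmem : y ∉ l := by
          intro hmem
          have := PySem.List.max?_isMax hmax y hmem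
          simp at this; omega
        rw [if_pos (show f (10 + (n : Int)) > M from hgt),
          max_eq_right (le_of_lt hgt),
          PySem.List.index?_append_singleton_self l y hynotmem]
        simp only [Option.getD_some, hlen]
        rw [Int.add_comm (n : Int) 10]
      · have hMmem : M ∈ l := PySem.List.max?_mem hmax
        rw [max_eq_left (not_lt.mp hgt), PySem.List.index?_append_of_mem [y] hMmem,
          if_neg (show ¬ f (10 + (n : Int)) > M from hgt)]

-- ===== VERDICT (by name: the statement is the Claim_ definition above) =====
theorem naive_spec : Claim_equal_naive := by
  intro a _
  unfold Spec_naive naive naive_alt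
  -- A's topp is the list of counts pvCnt over j = 10..99
  have htopp : (PySem.List.pyRange 10 100 1).foldl (fun topp j =>
      topp ++ [(PySem.List.pyRange 0 (PySem.List.len a - 1) 1).foldl (fun k i =>
        if PySem.Int.toStr j == PySem.List.pyGetD a i "" ++ PySem.List.pyGetD a (i + 1) ""
        then k + 1 else k) (0 : Int)]) ([] : List Int)
      = (PySem.List.pyRange 10 100 1).map (pvCnt a) := by
    rw [show (fun (topp : List Int) j =>
        topp ++ [(PySem.List.pyRange 0 (PySem.List.len a - 1) 1).foldl (fun k i =>
          if PySem.Int.toStr j == PySem.List.pyGetD a i "" ++ PySem.List.pyGetD a (i + 1) ""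
          then k + 1 else k) (0 : Int)]) = (fun (topp : List Int) j => topp ++ [pvCnt a j]) from by
      funext topp j; rw [pvInner_eq]]
    rw [PySem.List.foldl_append_singleton_eq_map]
    simp
  have hstep : (fun (best : Int × Int) j =>
      let c := ((PySem.List.pyRange 0 (PySem.List.len a - 1) 1).foldl (fun d i =>
        let s := PySem.List.pyGetD a i "" ++ PySem.List.pyGetD a (i + 1) ""
        d.insert s (d.getD s 0 + 1)) PySem.Dict.empty).getD (PySem.Int.toStr j) 0
      if c > best.1 then (c, j) else best)
      = (fun (best : Int × Int) j => if pvCnt a j > best.1 then (pvCnt a j, j) else best) := by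
    funext best j
    simp only [pvDict_eq]
  simp only [htopp, hstep]
  have h90 := pvBest_spec (pvCnt a) (pvCnt_nonneg a) 90 (by norm_num)
  rw [show (10 : Int) + ((90 : Nat) : Int) = 100 by norm_num] at h90
  exact h90.symm
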